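-- pv_equiv track=rewrite | github.com/dennislin727/monster_and_i_v3 | _organize_sound_0405.py | expand_rules
-- ===== SOURCE A (Python) =====
-- from collections import defaultdict
--
-- BROAD_PREFIX_DENY: frozenset[str] = frozenset({"OBJMisc"})
--
-- def expand_rules(rules: list[tuple[str, str]]) -> list[tuple[str, str]]:
--     """加入廣義前綴（代碼 + '_'）：僅當該代碼在試算表中只對應一個目標資料夾時才加入。"""
--     by_head: dict[str, set[str]] = defaultdict(set)
--     for key, folder in rules:
--         if "_" not in key:
--             continue
--         by_head[key.split("_", 1)[0]].add(folder)
--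
--     out: list[tuple[str, str]] = list(rules)
--     seen: set[tuple[str, str]] = set(rules)
--     for key, folder in rules:
--         if "_" not in key:
--             continue
--         head = key.split("_", 1)[0]
--         if len(head) < 4:
--             continue
--         if head in BROAD_PREFIX_DENY:
--             continue
--         if len(by_head[head]) != 1:
--             continue
--         broad = head + "_"
--         if broad == key:
--             continue
--         pair = (broad, folder)
--         if pair not in seen:
--             seen.add(pair)
--             out.append(pair)
--     return out
-- ===== SOURCE B (Python) =====
-- BROAD_PREFIX_DENY: frozenset[str] = frozenset({"OBJMisc"})
--
-- _AMBIG = object()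
--
-- def expand_rules(rules: list[tuple[str, str]]) -> list[tuple[str, str]]:
--     """Single pass: remember, per qualifying head, its folder or an ambiguity marker;
--     then emit the broad rules from that table in one comprehension."""
--     cand: dict[str, object] = {}
--     for key, folder in rules:
--         if "_" not in key:
--             continue
--         head = key.split("_", 1)[0]
--         if len(head) < 4 or head in BROAD_PREFIX_DENY:
--             continue
--         prev = cand.get(head)
--         if prev is None:
--             cand[head] = folder
--         elif prev is not _AMBIG and prev != folder:
--             cand[head] = _AMBIG
--     seen = set(rules)
--     return rules + [(h + "_", f) for h, f in cand.items()
--                     if f is not _AMBIG and (h + "_", f) not in seen]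
-- ===== Notes on version B (the rewrite author's own statement) =====
-- stated objective: simpler
-- what changed: A groups every head's folders into sets and then re-scans the whole rules list a second time, deduplicating appended pairs through a growing seen set; B makes one grouping pass that keeps per qualifying head either its unique folder or an ambiguity marker and emits the broad rules directly from that table with a single comprehension, with no second scan of the rules and no mutable seen set.
import Mathlib
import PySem

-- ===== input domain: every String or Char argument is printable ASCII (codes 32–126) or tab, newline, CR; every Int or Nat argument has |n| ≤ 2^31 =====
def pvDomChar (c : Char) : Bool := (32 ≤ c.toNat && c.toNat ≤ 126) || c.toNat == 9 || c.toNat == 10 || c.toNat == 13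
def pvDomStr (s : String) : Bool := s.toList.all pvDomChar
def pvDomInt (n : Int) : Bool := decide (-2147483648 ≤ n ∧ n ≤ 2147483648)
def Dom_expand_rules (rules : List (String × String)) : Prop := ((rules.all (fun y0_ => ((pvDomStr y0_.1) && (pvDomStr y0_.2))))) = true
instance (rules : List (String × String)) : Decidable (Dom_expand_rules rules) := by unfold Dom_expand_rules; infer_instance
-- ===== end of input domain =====

-- B replaces A's two passes (group each head's folders into a set, then re-scan the whole
-- rules list against a growing `seen` set) by one grouping pass that keeps, per qualifying
-- head, its single folder or an ambiguity marker, and emits the broad rules straight from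
-- that table (objective: simpler).

-- ===== PORT A =====
-- BROAD_PREFIX_DENY (a one-element frozenset; only membership is tested on it)
def pvDeny : List String := ["OBJMisc"]

-- shared transliteration of `key.split("_", 1)[0]` (both Pythons compute exactly this
-- expression); the "" fallback is unreachable: splitting at the nonempty separator "_"
-- always yields `some` of a nonempty list
def pvHead (key : String) : String :=
  match PySem.Str.splitMax? key "_" 1 with
  | some (h :: _) => h
  | _ => ""

-- A's first loop: by_head[key.split("_", 1)[0]].add(folder) on a defaultdict(set)
def pvByHead (rules : List (String × String)) : PySem.Dict String (PySem.Set String) :=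
  rules.foldl (fun d kf =>
    if PySem.Str.isIn "_" kf.1 then
      PySem.Dict.modify d (pvHead kf.1) PySem.Set.empty (fun s => PySem.Set.add s kf.2)
    else d) PySem.Dict.empty

-- body of A's second loop; state = (out, seen)
def pvStepA (byHead : PySem.Dict String (PySem.Set String))
    (st : List (String × String) × PySem.Set (String × String)) (kf : String × String) :
    List (String × String) × PySem.Set (String × String) :=
  if PySem.Str.isIn "_" kf.1 then
    let head := pvHead kf.1
    if PySem.Str.len head < 4 then st
    else if head ∈ pvDeny then st
    else if PySem.Set.len (PySem.Dict.getD byHead head PySem.Set.empty) ≠ 1 then st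
    else
      let broad := head ++ "_"
      if broad = kf.1 then st
      else
        let pair := (broad, kf.2)
        if PySem.Set.contains st.2 pair then st
        else (st.1 ++ [pair], PySem.Set.add st.2 pair)
  else st

def expand_rules (rules : List (String × String)) : List (String × String) :=
  (rules.foldl (pvStepA (pvByHead rules)) (rules, PySem.Set.ofList rules)).1

-- ===== PORT B =====
-- body of B's single pass: cand maps a qualifying head to `some folder` (its unique
-- folder so far) or `none` (B's _AMBIG marker); a head absent from cand was not seen yet
def pvStepB (c : PySem.Dict String (Option String)) (kf : String × String) :
    PySem.Dict String (Option String) :=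
  if PySem.Str.isIn "_" kf.1 then
    let head := pvHead kf.1
    if PySem.Str.len head < 4 ∨ head ∈ pvDeny then c
    else
      match PySem.Dict.get? c head with
      | none => PySem.Dict.insert c head (some kf.2)
      | some none => c
      | some (some prev) => if prev ≠ kf.2 then PySem.Dict.insert c head none else c
  else c

def expand_rules_alt (rules : List (String × String)) : List (String × String) :=
  let cand := rules.foldl pvStepB PySem.Dict.empty
  let seen := PySem.Set.ofList rules
  rules ++ (PySem.Dict.items cand).filterMap (fun hf =>
    match hf.2 with
    | none => none
    | some f =>
      if PySem.Set.contains seen (hf.1 ++ "_", f) then none else some (hf.1 ++ "_", f))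

-- ===== PRECONDITION & SPEC =====
def Spec_expand_rules (rules : List (String × String)) (out : List (String × String)) : Prop := out = expand_rules_alt rules
instance (rules : List (String × String)) (out : List (String × String)) : Decidable (Spec_expand_rules rules out) := by unfold Spec_expand_rules; infer_instance

-- ===== CLAIM (what is proved, stated in full; the proofs are below) =====
def Claim_equal_expand_rules : Prop := ∀ (rules : List (String × String)), Dom_expand_rules rules → Spec_expand_rules rules (expand_rules rules)

-- ===== LEMMAS AND PROOFS =====
-- proof-side characterisations of the two programs


def pvGood (kf : String × String) : Bool :=
  PySem.Str.isIn "_" kf.1 && !decide (PySem.Str.len (pvHead kf.1) < 4)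
    && !decide (pvHead kf.1 ∈ pvDeny)

def pvFolders (h : String) (l : List (String × String)) : List String :=
  (l.filter (fun kf => PySem.Str.isIn "_" kf.1 && decide (pvHead kf.1 = h))).map (fun kf => kf.2)

def pvUniq (fs : List String) : Option String :=
  match PySem.Set.ofList fs with
  | [f] => some f
  | _ => none

def pvQH (p : List (String × String)) : List String :=
  PySem.Set.ofList ((p.filter pvGood).map (fun kf => pvHead kf.1))

def pvEmit (rules : List (String × String)) (h : String) : Option (String × String) :=
  match pvUniq (pvFolders h rules) with
  | none => none
  | some f =>
    if PySem.Set.contains (PySem.Set.ofList rules) (h ++ "_", f) then none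
    else some (h ++ "_", f)

def pvE (rules p : List (String × String)) : List (String × String) :=
  (pvQH p).filterMap (pvEmit rules)

theorem pvFolders_append (h : String) (l : List (String × String)) (kf : String × String) :
    pvFolders h (l ++ [kf]) = pvFolders h l ++
      (if PySem.Str.isIn "_" kf.1 && decide (pvHead kf.1 = h) then [kf.2] else []) := by
  simp only [pvFolders, List.filter_append, List.map_append, List.filter_cons, List.filter_nil]
  cases hc : (PySem.Str.isIn "_" kf.1 && decide (pvHead kf.1 = h)) <;> simp

theorem pvByHead_getD (rules : List (String × String)) (h : String) :
    PySem.Dict.getD (pvByHead rules) h PySem.Set.empty = PySem.Set.ofList (pvFolders h rules) := by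
  induction rules using List.reverseRecOn with
  | nil => simp [pvByHead, pvFolders, PySem.Dict.getD_empty, PySem.Set.ofList_nil, PySem.Set.empty_eq]
  | append_singleton l kf ih =>
    rw [pvFolders_append, pvByHead, List.foldl_append, List.foldl_cons, List.foldl_nil]
    rw [show l.foldl _ PySem.Dict.empty = pvByHead l from rfl]
    cases hIs : PySem.Str.isIn "_" kf.1 with
    | false => simp only [Bool.false_and, if_false, Bool.false_eq_true, List.append_nil, ih]
    | true =>
      simp only [Bool.true_and, if_true]
      by_cases hh : pvHead kf.1 = h
      · subst hh
        rw [PySem.Dict.getD_modify_self, ih]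
        simp [PySem.Set.ofList_append_singleton]
      · rw [PySem.Dict.getD_modify_of_ne _ _ _ (fun he => hh he.symm), ih]
        simp [hh]

theorem mem_pvQH (p : List (String × String)) (h : String) :
    h ∈ pvQH p ↔ ∃ kf ∈ p, pvGood kf = true ∧ pvHead kf.1 = h := by
  unfold pvQH
  rw [PySem.Set.mem_ofList]
  simp only [List.mem_map, List.mem_filter]
  constructor
  · rintro ⟨kf, ⟨hm, hg⟩, hh⟩; exact ⟨kf, hm, hg, hh⟩
  · rintro ⟨kf, hm, hg, hh⟩; exact ⟨kf, ⟨hm, hg⟩, hh⟩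

theorem pvQH_append (p : List (String × String)) (kf : String × String) :
    pvQH (p ++ [kf]) =
      if pvGood kf then PySem.Set.add (pvQH p) (pvHead kf.1) else pvQH p := by
  unfold pvQH
  rw [List.filter_append, List.map_append]
  cases hg : pvGood kf with
  | false => simp [hg]
  | true => simp [hg, PySem.Set.ofList_append_singleton]

theorem pvUniq_eq_some_iff (fs : List String) (f : String) :
    pvUniq fs = some f ↔ PySem.Set.ofList fs = [f] := by
  unfold pvUniq
  rcases hm : PySem.Set.ofList fs with _ | ⟨a, _ | ⟨b, t⟩⟩ <;> simp

theorem pvUniq_eq_none_iff (fs : List String) :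
    pvUniq fs = none ↔ (PySem.Set.ofList fs).length ≠ 1 := by
  unfold pvUniq
  rcases hm : PySem.Set.ofList fs with _ | ⟨a, _ | ⟨b, t⟩⟩ <;> simp

theorem pvUniq_append_self {fs : List String} {f : String} (h : pvUniq fs = some f) :
    pvUniq (fs ++ [f]) = some f := by
  rw [pvUniq_eq_some_iff] at h ⊢
  rw [PySem.Set.ofList_append_singleton, h, PySem.Set.add_of_mem (by simp)]

theorem pvUniq_append_ne {fs : List String} {f x : String} (h : pvUniq fs = some f)
    (hx : x ≠ f) : pvUniq (fs ++ [x]) = none := by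
  rw [pvUniq_eq_some_iff] at h
  rw [pvUniq_eq_none_iff, PySem.Set.ofList_append_singleton, h,
    PySem.Set.add_of_not_mem (by simp [hx])]
  simp

theorem pvUniq_append_none {fs : List String} {x : String} (hne : fs ≠ [])
    (h : pvUniq fs = none) : pvUniq (fs ++ [x]) = none := by
  rw [pvUniq_eq_none_iff] at h ⊢
  rw [PySem.Set.ofList_append_singleton]
  rcases hm : PySem.Set.ofList fs with _ | ⟨a, _ | ⟨b, t⟩⟩
  · rcases fs with _ | ⟨y, ys⟩
    · exact absurd rfl hne
    · have : y ∈ PySem.Set.ofList (y :: ys) := by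
        rw [PySem.Set.mem_ofList]; exact List.mem_cons_self
      rw [hm] at this; simp at this
  · rw [hm] at h; simp at h
  · rw [PySem.Set.add_eq_ite]
    split_ifs <;> simp

theorem pvFolders_ne_nil {p rules : List (String × String)} {h : String}
    (hsub : p <+: rules) (hq : h ∈ pvQH p) : pvFolders h rules ≠ [] := by
  rw [mem_pvQH] at hq
  obtain ⟨kf, hm, hg, hh⟩ := hq
  have hmr : kf ∈ rules := hsub.sublist.mem hm
  have : kf.2 ∈ pvFolders h rules := by
    simp only [pvFolders, List.mem_map]
    refine ⟨kf, ?_, rfl⟩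
    rw [List.mem_filter]
    refine ⟨hmr, ?_⟩
    simp only [pvGood, Bool.and_eq_true] at hg
    simp only [Bool.and_eq_true, decide_eq_true_eq]
    exact ⟨hg.1.1, hh⟩
  intro hnil; rw [hnil] at this; simp at this

theorem pvEmit_fst {rules : List (String × String)} {h : String} {pr : String × String}
    (he : pvEmit rules h = some pr) : pr.1 = h ++ "_" := by
  unfold pvEmit at he
  rcases hu : pvUniq (pvFolders h rules) with _ | f <;> rw [hu] at he
  · simp at he
  · simp only [] at he
    split_ifs at he with hc
    rw [← Option.some.inj he]

theorem pvFolders_append_of_ne {h : String} {l : List (String × String)} {kf : String × String}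
    (hne : pvHead kf.1 ≠ h) : pvFolders h (l ++ [kf]) = pvFolders h l := by
  rw [pvFolders_append]
  simp [hne]

theorem pvFolders_append_notIn {h : String} {l : List (String × String)} {kf : String × String}
    (hIs : PySem.Str.isIn "_" kf.1 = false) : pvFolders h (l ++ [kf]) = pvFolders h l := by
  rw [pvFolders_append, hIs]
  simp

theorem pvFolders_append_self {l : List (String × String)} {kf : String × String}
    (hIs : PySem.Str.isIn "_" kf.1 = true) :
    pvFolders (pvHead kf.1) (l ++ [kf]) = pvFolders (pvHead kf.1) l ++ [kf.2] := by
  rw [pvFolders_append, hIs]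
  simp

theorem pvUniq_singleton (x : String) : pvUniq [x] = some x := rfl

theorem pvGet?_mk_map (hs : List String) (v : String → Option String) (x : String) :
    (PySem.Dict.mk (hs.map (fun h => (h, v h)))).get? x =
      if x ∈ hs then some (v x) else none := by
  induction hs with
  | nil => simp [PySem.Dict.get?]
  | cons a t ih =>
    rw [List.map_cons, PySem.Dict.get?_mk_cons]
    by_cases hax : a = x
    · subst hax; simp
    · rw [beq_eq_false_iff_ne.mpr hax]
      simp only [Bool.false_eq_true, if_false, ih, List.mem_cons]
      have : (x = a ∨ x ∈ t) ↔ x ∈ t := by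
        constructor
        · rintro (rfl | hm)
          · exact absurd rfl hax
          · exact hm
        · exact Or.inr
      rw [if_congr this rfl rfl]

theorem pvQH_head_conds {l : List (String × String)} {h : String} (hq : h ∈ pvQH l) :
    ¬ PySem.Str.len h < 4 ∧ h ∉ pvDeny := by
  rw [mem_pvQH] at hq
  obtain ⟨kf, _, hg, hh⟩ := hq
  simp only [pvGood, Bool.and_eq_true, Bool.not_eq_true', decide_eq_false_iff_not] at hg
  rw [hh] at hg
  exact ⟨hg.1.2, hg.2⟩

theorem pvFolders_eq_nil {l : List (String × String)} {h : String}
    (hlen : ¬ PySem.Str.len h < 4) (hdeny : h ∉ pvDeny) (hq : h ∉ pvQH l) :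
    pvFolders h l = [] := by
  rw [pvFolders, List.map_eq_nil_iff, List.filter_eq_nil_iff]
  intro kf hm
  simp only [Bool.and_eq_true, decide_eq_true_eq, not_and]
  intro hIs hh
  exact hq ((mem_pvQH l h).mpr ⟨kf, hm, by
    simp only [pvGood, Bool.and_eq_true, Bool.not_eq_true', decide_eq_false_iff_not, hh]
    exact ⟨⟨hIs, hlen⟩, hdeny⟩, hh⟩)

theorem pvCand_eq (l : List (String × String)) :
    l.foldl pvStepB PySem.Dict.empty =
      PySem.Dict.mk ((pvQH l).map (fun h => (h, pvUniq (pvFolders h l)))) := by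
  induction l using List.reverseRecOn with
  | nil => rfl
  | append_singleton l kf ih =>
    rw [List.foldl_append, List.foldl_cons, List.foldl_nil, ih]
    cases hIs : PySem.Str.isIn "_" kf.1 with
    | false =>
      have hg : pvGood kf = false := by unfold pvGood; rw [hIs]; simp
      rw [pvStepB, hIs]
      simp only [Bool.false_eq_true, if_false]
      rw [pvQH_append, hg]
      simp only [Bool.false_eq_true, if_false]
      congr 1
      exact (List.map_congr_left fun h _ => by rw [pvFolders_append_notIn hIs]).symm
    | true =>
      rw [pvStepB, hIs]
      simp only [if_true]
      by_cases hqual : PySem.Str.len (pvHead kf.1) < 4 ∨ pvHead kf.1 ∈ pvDeny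
      · rw [if_pos hqual]
        have hg : pvGood kf = false := by
          unfold pvGood; rw [hIs]
          rcases hqual with h1 | h1 <;> rw [decide_eq_true h1] <;> simp
        rw [pvQH_append, hg]
        simp only [Bool.false_eq_true, if_false]
        congr 1
        refine (List.map_congr_left fun h hm => ?_).symm
        rw [pvFolders_append_of_ne]
        rintro rfl
        rcases pvQH_head_conds hm with ⟨h1, h2⟩
        rcases hqual with h3 | h3
        · exact h1 h3
        · exact h2 h3
      · rw [if_neg hqual]
        rw [not_or] at hqual
        obtain ⟨hlen, hdeny⟩ := hqual
        have hg : pvGood kf = true := by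
          unfold pvGood; rw [hIs, decide_eq_false hlen, decide_eq_false hdeny]; simp
        rw [pvQH_append, hg]
        simp only [if_true]
        by_cases hmem : pvHead kf.1 ∈ pvQH l
        · rw [pvGet?_mk_map, if_pos hmem, PySem.Set.add_of_mem hmem]
          have hfs : pvFolders (pvHead kf.1) l ≠ [] :=
            pvFolders_ne_nil (List.prefix_refl l) hmem
          cases hu : pvUniq (pvFolders (pvHead kf.1) l) with
          | none =>
            simp only []
            congr 1
            refine (List.map_congr_left fun h hm => ?_).symm
            by_cases hh : h = pvHead kf.1
            · subst hh
              rw [pvFolders_append_self hIs, pvUniq_append_none hfs hu, hu]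
            · rw [pvFolders_append_of_ne (fun e => hh e.symm)]
          | some prev =>
            simp only []
            by_cases hpe : prev = kf.2
            · rw [if_neg (not_not_intro hpe)]
              congr 1
              refine (List.map_congr_left fun h hm => ?_).symm
              by_cases hh : h = pvHead kf.1
              · subst hh
                rw [pvFolders_append_self hIs, ← hpe, pvUniq_append_self hu, hu]
              · rw [pvFolders_append_of_ne (fun e => hh e.symm)]
            · rw [if_pos hpe]
              have hcont : (PySem.Dict.mk ((pvQH l).map
                  (fun h => (h, pvUniq (pvFolders h l))))).contains (pvHead kf.1) = true := by
                rw [PySem.Dict.contains_eq_isSome_get?, pvGet?_mk_map, if_pos hmem]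
                rfl
              apply PySem.Dict.ext
              rw [PySem.Dict.items_insert_of_contains _ _ hcont]
              show List.map _ (List.map _ (pvQH l)) = List.map _ (pvQH l)
              rw [List.map_map]
              refine List.map_congr_left fun h hm => ?_
              by_cases hh : h = pvHead kf.1
              · subst hh
                simp only [Function.comp]
                rw [if_pos (by simp)]
                rw [pvFolders_append_self hIs,
                  pvUniq_append_ne hu (fun e => hpe e.symm)]
              · simp only [Function.comp]
                rw [if_neg (by simp [hh])]
                rw [pvFolders_append_of_ne (fun e => hh e.symm)]
        · rw [pvGet?_mk_map, if_neg hmem]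
          simp only []
          have hcont : (PySem.Dict.mk ((pvQH l).map
              (fun h => (h, pvUniq (pvFolders h l))))).contains (pvHead kf.1) = false := by
            rw [PySem.Dict.contains_eq_isSome_get?, pvGet?_mk_map, if_neg hmem]
            rfl
          apply PySem.Dict.ext
          rw [PySem.Dict.items_insert_of_not_contains _ _ hcont]
          rw [PySem.Set.add_of_not_mem hmem]
          show List.map _ (pvQH l) ++ _ = List.map _ (pvQH l ++ [pvHead kf.1])
          rw [List.map_append]
          congr 1
          · refine List.map_congr_left fun h hm => ?_
            rw [pvFolders_append_of_ne (fun e => hmem (e ▸ hm))]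
          · rw [List.map_cons, List.map_nil]
            rw [pvFolders_append_self hIs, pvFolders_eq_nil hlen hdeny hmem]
            rw [show ([] ++ [kf.2] : List String) = [kf.2] from rfl, pvUniq_singleton]

theorem mem_pvE {rules p : List (String × String)} {pr : String × String} :
    pr ∈ pvE rules p ↔ ∃ h ∈ pvQH p, pvEmit rules h = some pr := by
  simp [pvE, List.mem_filterMap]

theorem pvE_append (rules p : List (String × String)) (kf : String × String) :
    pvE rules (p ++ [kf]) =
      if pvGood kf then
        (if pvHead kf.1 ∈ pvQH p then pvE rules p
         else pvE rules p ++ (pvEmit rules (pvHead kf.1)).toList)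
      else pvE rules p := by
  unfold pvE
  rw [pvQH_append]
  cases hg : pvGood kf with
  | false => simp
  | true =>
    simp only [if_true]
    by_cases hm : pvHead kf.1 ∈ pvQH p
    · rw [PySem.Set.add_of_mem hm, if_pos hm]
    · rw [PySem.Set.add_of_not_mem hm, if_neg hm, List.filterMap_append]
      cases he : pvEmit rules (pvHead kf.1) <;> simp [List.filterMap_nil, he]

theorem pvAloop (rules : List (String × String)) (p : List (String × String))
    (hp : p <+: rules) :
    p.foldl (pvStepA (pvByHead rules)) (rules, PySem.Set.ofList rules) =
      (rules ++ pvE rules p, (PySem.Set.ofList rules).update (pvE rules p)) := by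
  induction p using List.reverseRecOn with
  | nil =>
    simp only [List.foldl_nil, pvE, pvQH, List.filter_nil, List.map_nil,
      PySem.Set.ofList_nil, List.filterMap_nil, List.append_nil, PySem.Set.update_nil]
  | append_singleton p kf ih =>
    have hp' : p <+: rules := (List.prefix_append p [kf]).trans hp
    have hkf : kf ∈ rules := hp.sublist.mem (by simp)
    rw [List.foldl_append, List.foldl_cons, List.foldl_nil, ih hp']
    unfold pvStepA
    simp only []
    cases hIs : PySem.Str.isIn "_" kf.1 with
    | false =>
      have hg : pvGood kf = false := by unfold pvGood; rw [hIs]; simp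
      rw [pvE_append, hg]
      simp only [Bool.false_eq_true, if_false]
    | true =>
      simp only [if_true]
      by_cases hlen : PySem.Str.len (pvHead kf.1) < 4
      · have hg : pvGood kf = false := by
          unfold pvGood; rw [hIs, decide_eq_true hlen]; simp
        rw [pvE_append, hg, if_pos hlen]
        simp only [Bool.false_eq_true, if_false]
      · rw [if_neg hlen]
        by_cases hdeny : pvHead kf.1 ∈ pvDeny
        · have hg : pvGood kf = false := by
            unfold pvGood; rw [hIs, decide_eq_true hdeny]; simp
          rw [pvE_append, hg, if_pos hdeny]
          simp only [Bool.false_eq_true, if_false]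
        · rw [if_neg hdeny]
          have hg : pvGood kf = true := by
            unfold pvGood; rw [hIs, decide_eq_false hlen, decide_eq_false hdeny]; simp
          rw [pvByHead_getD, PySem.Set.len_eq]
          cases hu : pvUniq (pvFolders (pvHead kf.1) rules) with
          | none =>
            have hlength := (pvUniq_eq_none_iff _).mp hu
            rw [if_pos (by exact_mod_cast hlength)]
            have he : pvEmit rules (pvHead kf.1) = none := by unfold pvEmit; rw [hu]
            rw [pvE_append, hg]
            simp only [he, Option.toList_none, List.append_nil, ite_self]
          | some f0 =>
            have hofl := (pvUniq_eq_some_iff _ _).mp hu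
            rw [if_neg (by rw [hofl]; simp)]
            have hf2 : kf.2 = f0 := by
              have hmem : kf.2 ∈ PySem.Set.ofList (pvFolders (pvHead kf.1) rules) := by
                rw [PySem.Set.mem_ofList]
                simp only [pvFolders, List.mem_map]
                exact ⟨kf, List.mem_filter.mpr ⟨hkf, by rw [hIs]; simp⟩, rfl⟩
              rw [hofl] at hmem
              simpa using hmem
            by_cases hbk : pvHead kf.1 ++ "_" = kf.1
            · rw [if_pos hbk]
              have hpr : ((pvHead kf.1 ++ "_", f0) : String × String) ∈ rules := by
                rw [hbk, ← hf2]
                exact hkf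
              have he : pvEmit rules (pvHead kf.1) = none := by
                unfold pvEmit
                rw [hu]
                simp only []
                rw [if_pos ((PySem.Set.contains_iff _ _).mpr
                  ((PySem.Set.mem_ofList _ _).mpr hpr))]
              rw [pvE_append, hg]
              simp only [he, Option.toList_none, List.append_nil, ite_self]
            · rw [if_neg hbk]
              by_cases hm : pvHead kf.1 ∈ pvQH p
              · rw [pvE_append, hg]
                simp only [if_true, if_pos hm]
                have hcon : PySem.Set.contains ((PySem.Set.ofList rules).update (pvE rules p))
                    (pvHead kf.1 ++ "_", kf.2) = true := by
                  rw [PySem.Set.contains_iff, PySem.Set.mem_update]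
                  by_cases hr : ((pvHead kf.1 ++ "_", kf.2) : String × String) ∈ rules
                  · exact Or.inl ((PySem.Set.mem_ofList _ _).mpr hr)
                  · refine Or.inr (mem_pvE.mpr ⟨pvHead kf.1, hm, ?_⟩)
                    unfold pvEmit
                    rw [hu]
                    simp only []
                    rw [if_neg (fun hc => hr (by
                      rw [hf2]
                      exact (PySem.Set.mem_ofList _ _).mp ((PySem.Set.contains_iff _ _).mp hc))), hf2]
                rw [hcon]
                simp only [if_true]
              · rw [pvE_append, hg]
                simp only [if_true, if_neg hm]
                by_cases hr : ((pvHead kf.1 ++ "_", kf.2) : String × String) ∈ rules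
                · have he : pvEmit rules (pvHead kf.1) = none := by
                    unfold pvEmit
                    rw [hu]
                    simp only []
                    rw [if_pos ((PySem.Set.contains_iff _ _).mpr
                      ((PySem.Set.mem_ofList _ _).mpr (hf2 ▸ hr)))]
                  have hcon : PySem.Set.contains ((PySem.Set.ofList rules).update (pvE rules p))
                      (pvHead kf.1 ++ "_", kf.2) = true := by
                    rw [PySem.Set.contains_iff, PySem.Set.mem_update]
                    exact Or.inl ((PySem.Set.mem_ofList _ _).mpr hr)
                  rw [hcon]
                  simp only [if_true, he, Option.toList_none, List.append_nil]
                · have he : pvEmit rules (pvHead kf.1) = some (pvHead kf.1 ++ "_", f0) := by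
                    unfold pvEmit
                    rw [hu]
                    simp only []
                    rw [if_neg (fun hc => hr (by
                      rw [hf2]
                      exact (PySem.Set.mem_ofList _ _).mp ((PySem.Set.contains_iff _ _).mp hc)))]
                  have hcon : PySem.Set.contains ((PySem.Set.ofList rules).update (pvE rules p))
                      (pvHead kf.1 ++ "_", kf.2) = false := by
                    rw [Bool.eq_false_iff]
                    intro hc
                    rcases (PySem.Set.mem_update _ _ _).mp ((PySem.Set.contains_iff _ _).mp hc) with
                      hin | hin
                    · exact hr ((PySem.Set.mem_ofList _ _).mp hin)
                    · obtain ⟨h, hhm, hemit⟩ := mem_pvE.mp hin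
                      have h1 : (pvHead kf.1 ++ "_") = h ++ "_" := pvEmit_fst hemit
                      have : h = pvHead kf.1 := ((String.append_left_inj _).mp h1).symm
                      exact hm (this ▸ hhm)
                  rw [hcon]
                  simp only [Bool.false_eq_true, if_false, he, Option.toList_some]
                  rw [hf2, List.append_assoc, PySem.Set.update_append,
                    PySem.Set.update_cons, PySem.Set.update_nil]

theorem pvFinal (rules : List (String × String)) : expand_rules rules = expand_rules_alt rules := by
  unfold expand_rules expand_rules_alt
  rw [pvAloop rules rules (List.prefix_refl rules), pvCand_eq]
  show rules ++ pvE rules rules = rules ++ List.filterMap _ (List.map _ (pvQH rules))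
  rw [List.filterMap_map]
  congr 1

-- ===== VERDICT (by name: the statement is the Claim_ definition above) =====
theorem expand_rules_spec : Claim_equal_expand_rules := by
  intro rules _
  unfold Spec_expand_rules
  exact pvFinal rules
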